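-- pv_equiv track=rewrite | github.com/jisc-services/oa-PubRouter-App | src/router/shared/models/note.py | decode_category
-- ===== SOURCE A (Python) =====
-- def decode_category(cat_code, raise_on_error=True):
--     """
--     Convert 1 to 3 character Category code into resource type description using COAR Controlled Vocabulary
--     See: https://vocabularies.coar-repositories.org/resource_types/
--
--     :param cat_code: String - 1 to 3 character UPPERCASE category code
--     :param raise_on_error: Boolean - True: Raise an EncodingWarning exception if category code doesn't exactly match;
--                                      False: Return Error string in place of decoded category
--     :return: Category description string
--     """
--     cat_map = {
--         "J": ("journal",
--               {
--                 "E": ("editorial", None),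
--                 "A": ("journal article",
--                       {
--                           "C": ("corrigendum", None),
--                           "D": ("data paper", None),
--                           "R": ("research article", None),
--                           "V": ("review article", None),
--                           "S": ("software paper", None)
--                       }),
--                 "L": ("letter to the editor", None)
--               }),
--         "B": ("book",   # Aka Monograph
--               {
--                   "C": ("book part", None)  # Aka Book chapter
--               }),
--         "C": ("conference output",
--               {
--                   "E": ("conference presentation", None),
--                   "P": ("conference proceedings",
--                         {
--                             "A": ("conference paper", None),
--                             "O": ("conference poster", None)
--                         }),
--                   "A": ("conference paper not in proceedings", None),
--                   "O": ("conference poster not in proceedings", None)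
--               }),
--         "R": ("Report",
--               {
--                   "C": ("clinical study", None),
--                   "D": ("data management plan", None),
--                   "M": ("memorandum", None),
--                   "O": ("policy report", None),
--                   "P": ("project deliverable", None),
--                   "R": ("research report", None),
--                   "T": ("technical report", None),
--                   "L": ("research protocol", None)
--               }),
--         "P": ("preprint", None),
--         "V": ("review",
--               {
--                   "B": ("book review", None),
--                   "C": ("commentary", None),
--                   "P": ("peer review", None)
--               }),
--         "L": ("letter", None),
--         "U": ("lecture", None),
--         "O": ("other", None)
--     }
--     desc = None
--     mapped_code = ""
--     ok = False
--     if cat_code: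
--         map_dict = cat_map
--         # Iterate over list of characters in category-code string
--         for code_char in list(cat_code):
--             desc, map_dict = map_dict.get(code_char, (None, None))
--             if desc:
--                 mapped_code += code_char
--             if not map_dict:
--                 break
--     if not desc:
--         desc = f"Unrecognised category code: '{cat_code}'"
--     elif cat_code != mapped_code:
--         desc += f" - partially matched '{mapped_code}' of code: '{cat_code}'"
--     else:
--         ok = True
--     if not ok and raise_on_error:
--         raise EncodingWarning(desc)
--
--     return desc
-- ===== SOURCE B (Python) =====
-- _FLAT = {
--     "J": "journal", "JE": "editorial", "JA": "journal article",
--     "JAC": "corrigendum", "JAD": "data paper", "JAR": "research article",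
--     "JAV": "review article", "JAS": "software paper", "JL": "letter to the editor",
--     "B": "book", "BC": "book part",
--     "C": "conference output", "CE": "conference presentation",
--     "CP": "conference proceedings", "CPA": "conference paper", "CPO": "conference poster",
--     "CA": "conference paper not in proceedings", "CO": "conference poster not in proceedings",
--     "R": "Report", "RC": "clinical study", "RD": "data management plan",
--     "RM": "memorandum", "RO": "policy report", "RP": "project deliverable",
--     "RR": "research report", "RT": "technical report", "RL": "research protocol",
--     "P": "preprint",
--     "V": "review", "VB": "book review", "VC": "commentary", "VP": "peer review",
--     "L": "letter", "U": "lecture", "O": "other",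
-- }
-- # codes that are internal nodes (have longer codes extending them)
-- _INTERNAL = {"J", "JA", "B", "C", "CP", "R", "V"}
--
--
-- def decode_category(cat_code, raise_on_error=True):
--     # phase 1: longest prefix of cat_code that is a known code, grown one char at a time
--     mapped_code, desc, prefix = "", None, ""
--     for ch in cat_code:
--         prefix += ch
--         d = _FLAT.get(prefix)
--         if d is None:
--             break
--         mapped_code, desc = prefix, d
--     # phase 2: classify
--     if desc is not None and mapped_code == cat_code:
--         return desc
--     if desc is not None and mapped_code not in _INTERNAL:
--         msg = f"{desc} - partially matched '{mapped_code}' of code: '{cat_code}'"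
--     else:
--         msg = f"Unrecognised category code: '{cat_code}'"
--     if raise_on_error:
--         raise EncodingWarning(msg)
--     return msg
-- ===== Notes on version B (the rewrite author's own statement) =====
-- stated objective: simpler
-- what changed: Replaces the nested cat_map trie walked char-by-char with inline desc/map_dict bookkeeping by a flat code->description dict plus a precomputed set of internal (prefix) codes: phase 1 finds the longest known prefix, phase 2 classifies it as exact, partial (leaf prefix) or unrecognised.
import Mathlib
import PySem

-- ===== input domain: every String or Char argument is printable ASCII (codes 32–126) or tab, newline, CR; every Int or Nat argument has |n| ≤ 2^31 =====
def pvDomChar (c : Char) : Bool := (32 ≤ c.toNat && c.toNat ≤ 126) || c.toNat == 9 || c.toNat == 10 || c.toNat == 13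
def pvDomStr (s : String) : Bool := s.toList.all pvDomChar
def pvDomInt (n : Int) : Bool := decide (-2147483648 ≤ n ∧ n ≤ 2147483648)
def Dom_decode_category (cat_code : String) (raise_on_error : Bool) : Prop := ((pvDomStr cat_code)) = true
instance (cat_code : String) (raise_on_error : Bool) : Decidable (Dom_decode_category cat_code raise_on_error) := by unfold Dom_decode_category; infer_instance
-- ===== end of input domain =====

-- B replaces A's nested-trie walk by a flat code→description table with a longest-prefix
-- scan and a separate classification step (objective: simpler).  Where Python A raises
-- EncodingWarning (raise_on_error=True and no exact match) Python B raises the same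
-- exception; those inputs are excluded by Pre_, and both ports return the message string.

-- ===== PORT A =====
-- a dict level of the nested cat_map: a linked list of (char, desc, child-dict, rest);
-- nil plays the role of Python's None / absent child
inductive CatDict where
  | nil : CatDict
  | cons : Char → String → CatDict → CatDict → CatDict
deriving DecidableEq, Repr

-- map_dict.get(code_char, (None, None)): first match in the level
def CatDict.get? : CatDict → Char → Option (String × CatDict)
  | .nil, _ => none
  | .cons k d child rest, c => if c = k then some (d, child) else rest.get? c

-- the sub-dicts of cat_map (named pieces of the one nested literal in A)
def tJA : CatDict :=
  .cons 'C' "corrigendum" .nil (.cons 'D' "data paper" .nil (.cons 'R' "research article" .nil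
    (.cons 'V' "review article" .nil (.cons 'S' "software paper" .nil .nil))))
def tJ : CatDict :=
  .cons 'E' "editorial" .nil (.cons 'A' "journal article" tJA
    (.cons 'L' "letter to the editor" .nil .nil))
def tB : CatDict := .cons 'C' "book part" .nil .nil
def tCP : CatDict :=
  .cons 'A' "conference paper" .nil (.cons 'O' "conference poster" .nil .nil)
def tC : CatDict :=
  .cons 'E' "conference presentation" .nil (.cons 'P' "conference proceedings" tCP
    (.cons 'A' "conference paper not in proceedings" .nil
      (.cons 'O' "conference poster not in proceedings" .nil .nil)))
def tR : CatDict :=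
  .cons 'C' "clinical study" .nil (.cons 'D' "data management plan" .nil
    (.cons 'M' "memorandum" .nil (.cons 'O' "policy report" .nil
      (.cons 'P' "project deliverable" .nil (.cons 'R' "research report" .nil
        (.cons 'T' "technical report" .nil (.cons 'L' "research protocol" .nil .nil)))))))
def tV : CatDict :=
  .cons 'B' "book review" .nil (.cons 'C' "commentary" .nil (.cons 'P' "peer review" .nil .nil))

def catMap : CatDict :=
  .cons 'J' "journal" tJ (.cons 'B' "book" tB (.cons 'C' "conference output" tC
    (.cons 'R' "Report" tR (.cons 'P' "preprint" .nil (.cons 'V' "review" tV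
      (.cons 'L' "letter" .nil (.cons 'U' "lecture" .nil (.cons 'O' "other" .nil .nil))))))))

-- the for-loop over list(cat_code); state = (desc, map_dict, mapped_code); break = return
def decodeLoop : List Char → CatDict → Option String → String → Option String × String
  | [], _, desc, mapped => (desc, mapped)
  | c :: rest, m, _, mapped =>
    match m.get? c with
    | none => (none, mapped)                     -- desc = None, map_dict falsy: break
    | some (d, child) =>
      let mapped' := if d ≠ "" then mapped ++ String.ofList [c] else mapped   -- if desc: mapped_code += code_char
      if child = .nil then (some d, mapped')     -- if not map_dict: break
      else decodeLoop rest child (some d) mapped'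

-- A returns `desc`; on the raising branch (not ok and raise_on_error) Python raises
-- EncodingWarning(desc) — those inputs are excluded by Pre_, the port returns desc there
def decode_category (cat_code : String) (raise_on_error : Bool) : String :=
  match (if cat_code ≠ "" then decodeLoop cat_code.toList catMap none "" else (none, "")) with
  | (none, _) => "Unrecognised category code: '" ++ cat_code ++ "'"
  | (some d, mapped) =>
    if d = "" then "Unrecognised category code: '" ++ cat_code ++ "'"   -- `if not desc` (truthiness)
    else if cat_code ≠ mapped then
      d ++ " - partially matched '" ++ mapped ++ "' of code: '" ++ cat_code ++ "'"
    else d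

-- ===== PORT B =====
-- _FLAT: every complete valid code → its description (association list = Python dict)
def flatMap : List (String × String) :=
  [("J", "journal"), ("JE", "editorial"), ("JA", "journal article"),
   ("JAC", "corrigendum"), ("JAD", "data paper"), ("JAR", "research article"),
   ("JAV", "review article"), ("JAS", "software paper"), ("JL", "letter to the editor"),
   ("B", "book"), ("BC", "book part"),
   ("C", "conference output"), ("CE", "conference presentation"),
   ("CP", "conference proceedings"), ("CPA", "conference paper"), ("CPO", "conference poster"),
   ("CA", "conference paper not in proceedings"), ("CO", "conference poster not in proceedings"),
   ("R", "Report"), ("RC", "clinical study"), ("RD", "data management plan"),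
   ("RM", "memorandum"), ("RO", "policy report"), ("RP", "project deliverable"),
   ("RR", "research report"), ("RT", "technical report"), ("RL", "research protocol"),
   ("P", "preprint"),
   ("V", "review"), ("VB", "book review"), ("VC", "commentary"), ("VP", "peer review"),
   ("L", "letter"), ("U", "lecture"), ("O", "other")]

-- _INTERNAL: the codes that longer codes extend
def internalCodes : List String := ["J", "JA", "B", "C", "CP", "R", "V"]

-- _FLAT.get(k): first match in the association list
def flatGet : List (String × String) → String → Option String
  | [], _ => none
  | (k, v) :: rest, s => if s = k then some v else flatGet rest s

-- the for-loop of B, phase 1: grow the matched prefix one character at a time;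
-- `done` is the prefix consumed so far, `todo` the characters still to come
def altLoop : List Char → List Char → String → Option String → String × Option String
  | _, [], mapped, desc => (mapped, desc)
  | done, c :: todo, mapped, desc =>
    match flatGet flatMap (String.ofList (done ++ [c])) with
    | none => (mapped, desc)                     -- break
    | some d => altLoop (done ++ [c]) todo (String.ofList (done ++ [c])) (some d)

-- phase 2: classify; on the raising branch (raise_on_error and no exact match) Python B
-- raises EncodingWarning(msg) — excluded by Pre_, the port returns msg there
def decode_category_alt (cat_code : String) (raise_on_error : Bool) : String :=
  match altLoop [] cat_code.toList "" none with
  | (mapped, some d) =>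
    if mapped = cat_code then d
    else if internalCodes.contains mapped then "Unrecognised category code: '" ++ cat_code ++ "'"
    else d ++ " - partially matched '" ++ mapped ++ "' of code: '" ++ cat_code ++ "'"
  | (_, none) => "Unrecognised category code: '" ++ cat_code ++ "'"

-- ===== PRECONDITION & SPEC =====
-- Pre_ excludes exactly the inputs on which Python A raises EncodingWarning:
-- raise_on_error=True together with a cat_code that is not an exact category code.
def Pre_decode_category (cat_code : String) (raise_on_error : Bool) : Prop :=
  raise_on_error = false ∨
    cat_code ∈ ["J", "JE", "JA", "JAC", "JAD", "JAR", "JAV", "JAS", "JL", "B", "BC",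
                "C", "CE", "CP", "CPA", "CPO", "CA", "CO",
                "R", "RC", "RD", "RM", "RO", "RP", "RR", "RT", "RL",
                "P", "V", "VB", "VC", "VP", "L", "U", "O"]
instance (cat_code : String) (raise_on_error : Bool) : Decidable (Pre_decode_category cat_code raise_on_error) := by
  unfold Pre_decode_category; infer_instance

def pvWitness_decode_category : String × Bool := ("JAC", true)

def Spec_decode_category (cat_code : String) (raise_on_error : Bool) (out : String) : Prop := out = decode_category_alt cat_code raise_on_error
instance (cat_code : String) (raise_on_error : Bool) (out : String) : Decidable (Spec_decode_category cat_code raise_on_error out) := by unfold Spec_decode_category; infer_instance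

-- ===== CLAIM (what is proved, stated in full; the proofs are below) =====
def Claim_equal_decode_category : Prop := ∀ (cat_code : String) (raise_on_error : Bool), Dom_decode_category cat_code raise_on_error → Pre_decode_category cat_code raise_on_error → Spec_decode_category cat_code raise_on_error (decode_category cat_code raise_on_error)

-- ===== LEMMAS AND PROOFS =====

-- the trie nodes that have children, with the code string leading to them
def nodeTable : List (CatDict × List Char) :=
  [(tJ, ['J']), (tJA, ['J', 'A']), (tB, ['B']), (tC, ['C']), (tCP, ['C', 'P']),
   (tR, ['R']), (tV, ['V'])]

-- a single trie step from node t (reached by code path p) agrees with the flat table: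
-- a missing char has no entry p++[c]; a hit has entry p++[c] with the same description,
-- and its child is either nil (then p++[c] is a leaf: not internal, no extensions) or an
-- internal node of the table
def StepOK (t : CatDict) (p : List Char) (c : Char) : Prop :=
  match t.get? c with
  | none => flatGet flatMap (String.ofList (p ++ [c])) = none
  | some (d, child) =>
      d ≠ "" ∧ flatGet flatMap (String.ofList (p ++ [c])) = some d ∧
      (if child = .nil then
        internalCodes.contains (String.ofList (p ++ [c])) = false ∧
          ∀ c', flatGet flatMap (String.ofList (p ++ [c] ++ [c'])) = none
       else
        (child, p ++ [c]) ∈ nodeTable ∧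
          internalCodes.contains (String.ofList (p ++ [c])) = true)

theorem tl_J : ("J" : String).toList = ['J'] := by decide
theorem tl_JE : ("JE" : String).toList = ['J', 'E'] := by decide
theorem tl_JA : ("JA" : String).toList = ['J', 'A'] := by decide
theorem tl_JAC : ("JAC" : String).toList = ['J', 'A', 'C'] := by decide
theorem tl_JAD : ("JAD" : String).toList = ['J', 'A', 'D'] := by decide
theorem tl_JAR : ("JAR" : String).toList = ['J', 'A', 'R'] := by decide
theorem tl_JAV : ("JAV" : String).toList = ['J', 'A', 'V'] := by decide
theorem tl_JAS : ("JAS" : String).toList = ['J', 'A', 'S'] := by decide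
theorem tl_JL : ("JL" : String).toList = ['J', 'L'] := by decide
theorem tl_B : ("B" : String).toList = ['B'] := by decide
theorem tl_BC : ("BC" : String).toList = ['B', 'C'] := by decide
theorem tl_C : ("C" : String).toList = ['C'] := by decide
theorem tl_CE : ("CE" : String).toList = ['C', 'E'] := by decide
theorem tl_CP : ("CP" : String).toList = ['C', 'P'] := by decide
theorem tl_CPA : ("CPA" : String).toList = ['C', 'P', 'A'] := by decide
theorem tl_CPO : ("CPO" : String).toList = ['C', 'P', 'O'] := by decide
theorem tl_CA : ("CA" : String).toList = ['C', 'A'] := by decide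
theorem tl_CO : ("CO" : String).toList = ['C', 'O'] := by decide
theorem tl_R : ("R" : String).toList = ['R'] := by decide
theorem tl_RC : ("RC" : String).toList = ['R', 'C'] := by decide
theorem tl_RD : ("RD" : String).toList = ['R', 'D'] := by decide
theorem tl_RM : ("RM" : String).toList = ['R', 'M'] := by decide
theorem tl_RO : ("RO" : String).toList = ['R', 'O'] := by decide
theorem tl_RP : ("RP" : String).toList = ['R', 'P'] := by decide
theorem tl_RR : ("RR" : String).toList = ['R', 'R'] := by decide
theorem tl_RT : ("RT" : String).toList = ['R', 'T'] := by decide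
theorem tl_RL : ("RL" : String).toList = ['R', 'L'] := by decide
theorem tl_P : ("P" : String).toList = ['P'] := by decide
theorem tl_V : ("V" : String).toList = ['V'] := by decide
theorem tl_VB : ("VB" : String).toList = ['V', 'B'] := by decide
theorem tl_VC : ("VC" : String).toList = ['V', 'C'] := by decide
theorem tl_VP : ("VP" : String).toList = ['V', 'P'] := by decide
theorem tl_L : ("L" : String).toList = ['L'] := by decide
theorem tl_U : ("U" : String).toList = ['U'] := by decide
theorem tl_O : ("O" : String).toList = ['O'] := by decide

theorem step_catMap (c : Char) : StepOK catMap [] c := by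
  by_cases h1 : c = 'J'
  · subst h1
    refine ⟨by decide, by decide, ?_⟩
    have hni : ¬ (tJ = CatDict.nil) := by decide
    simp only [if_neg hni]
    exact ⟨by decide, by decide⟩
  by_cases h2 : c = 'B'
  · subst h2
    refine ⟨by decide, by decide, ?_⟩
    have hni : ¬ (tB = CatDict.nil) := by decide
    simp only [if_neg hni]
    exact ⟨by decide, by decide⟩
  by_cases h3 : c = 'C'
  · subst h3
    refine ⟨by decide, by decide, ?_⟩
    have hni : ¬ (tC = CatDict.nil) := by decide
    simp only [if_neg hni]
    exact ⟨by decide, by decide⟩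
  by_cases h4 : c = 'R'
  · subst h4
    refine ⟨by decide, by decide, ?_⟩
    have hni : ¬ (tR = CatDict.nil) := by decide
    simp only [if_neg hni]
    exact ⟨by decide, by decide⟩
  by_cases h5 : c = 'P'
  · subst h5
    refine ⟨by decide, by decide, ?_⟩
    simp only [reduceIte]
    exact ⟨by decide, fun c' => by simp [flatGet, flatMap, String.ext_iff, tl_J, tl_JE, tl_JA, tl_JAC, tl_JAD, tl_JAR, tl_JAV, tl_JAS, tl_JL, tl_B, tl_BC, tl_C, tl_CE, tl_CP, tl_CPA, tl_CPO, tl_CA, tl_CO, tl_R, tl_RC, tl_RD, tl_RM, tl_RO, tl_RP, tl_RR, tl_RT, tl_RL, tl_P, tl_V, tl_VB, tl_VC, tl_VP, tl_L, tl_U, tl_O]⟩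
  by_cases h6 : c = 'V'
  · subst h6
    refine ⟨by decide, by decide, ?_⟩
    have hni : ¬ (tV = CatDict.nil) := by decide
    simp only [if_neg hni]
    exact ⟨by decide, by decide⟩
  by_cases h7 : c = 'L'
  · subst h7
    refine ⟨by decide, by decide, ?_⟩
    simp only [reduceIte]
    exact ⟨by decide, fun c' => by simp [flatGet, flatMap, String.ext_iff, tl_J, tl_JE, tl_JA, tl_JAC, tl_JAD, tl_JAR, tl_JAV, tl_JAS, tl_JL, tl_B, tl_BC, tl_C, tl_CE, tl_CP, tl_CPA, tl_CPO, tl_CA, tl_CO, tl_R, tl_RC, tl_RD, tl_RM, tl_RO, tl_RP, tl_RR, tl_RT, tl_RL, tl_P, tl_V, tl_VB, tl_VC, tl_VP, tl_L, tl_U, tl_O]⟩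
  by_cases h8 : c = 'U'
  · subst h8
    refine ⟨by decide, by decide, ?_⟩
    simp only [reduceIte]
    exact ⟨by decide, fun c' => by simp [flatGet, flatMap, String.ext_iff, tl_J, tl_JE, tl_JA, tl_JAC, tl_JAD, tl_JAR, tl_JAV, tl_JAS, tl_JL, tl_B, tl_BC, tl_C, tl_CE, tl_CP, tl_CPA, tl_CPO, tl_CA, tl_CO, tl_R, tl_RC, tl_RD, tl_RM, tl_RO, tl_RP, tl_RR, tl_RT, tl_RL, tl_P, tl_V, tl_VB, tl_VC, tl_VP, tl_L, tl_U, tl_O]⟩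
  by_cases h9 : c = 'O'
  · subst h9
    refine ⟨by decide, by decide, ?_⟩
    simp only [reduceIte]
    exact ⟨by decide, fun c' => by simp [flatGet, flatMap, String.ext_iff, tl_J, tl_JE, tl_JA, tl_JAC, tl_JAD, tl_JAR, tl_JAV, tl_JAS, tl_JL, tl_B, tl_BC, tl_C, tl_CE, tl_CP, tl_CPA, tl_CPO, tl_CA, tl_CO, tl_R, tl_RC, tl_RD, tl_RM, tl_RO, tl_RP, tl_RR, tl_RT, tl_RL, tl_P, tl_V, tl_VB, tl_VC, tl_VP, tl_L, tl_U, tl_O]⟩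
  simp only [StepOK, catMap, tB, tC, tJ, tR, tV, CatDict.get?, if_neg h1, if_neg h2, if_neg h3, if_neg h4, if_neg h5, if_neg h6, if_neg h7, if_neg h8, if_neg h9]
  simp_all [flatGet, flatMap, String.ext_iff, tl_J, tl_JE, tl_JA, tl_JAC, tl_JAD, tl_JAR, tl_JAV, tl_JAS, tl_JL, tl_B, tl_BC, tl_C, tl_CE, tl_CP, tl_CPA, tl_CPO, tl_CA, tl_CO, tl_R, tl_RC, tl_RD, tl_RM, tl_RO, tl_RP, tl_RR, tl_RT, tl_RL, tl_P, tl_V, tl_VB, tl_VC, tl_VP, tl_L, tl_U, tl_O]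

theorem step_tJ (c : Char) : StepOK tJ ['J'] c := by
  by_cases h1 : c = 'E'
  · subst h1
    refine ⟨by decide, by decide, ?_⟩
    simp only [reduceIte]
    exact ⟨by decide, fun c' => by simp [flatGet, flatMap, String.ext_iff, tl_J, tl_JE, tl_JA, tl_JAC, tl_JAD, tl_JAR, tl_JAV, tl_JAS, tl_JL, tl_B, tl_BC, tl_C, tl_CE, tl_CP, tl_CPA, tl_CPO, tl_CA, tl_CO, tl_R, tl_RC, tl_RD, tl_RM, tl_RO, tl_RP, tl_RR, tl_RT, tl_RL, tl_P, tl_V, tl_VB, tl_VC, tl_VP, tl_L, tl_U, tl_O]⟩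
  by_cases h2 : c = 'A'
  · subst h2
    refine ⟨by decide, by decide, ?_⟩
    have hni : ¬ (tJA = CatDict.nil) := by decide
    simp only [if_neg hni]
    exact ⟨by decide, by decide⟩
  by_cases h3 : c = 'L'
  · subst h3
    refine ⟨by decide, by decide, ?_⟩
    simp only [reduceIte]
    exact ⟨by decide, fun c' => by simp [flatGet, flatMap, String.ext_iff, tl_J, tl_JE, tl_JA, tl_JAC, tl_JAD, tl_JAR, tl_JAV, tl_JAS, tl_JL, tl_B, tl_BC, tl_C, tl_CE, tl_CP, tl_CPA, tl_CPO, tl_CA, tl_CO, tl_R, tl_RC, tl_RD, tl_RM, tl_RO, tl_RP, tl_RR, tl_RT, tl_RL, tl_P, tl_V, tl_VB, tl_VC, tl_VP, tl_L, tl_U, tl_O]⟩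
  simp only [StepOK, tJ, tJA, CatDict.get?, if_neg h1, if_neg h2, if_neg h3]
  simp_all [flatGet, flatMap, String.ext_iff, tl_J, tl_JE, tl_JA, tl_JAC, tl_JAD, tl_JAR, tl_JAV, tl_JAS, tl_JL, tl_B, tl_BC, tl_C, tl_CE, tl_CP, tl_CPA, tl_CPO, tl_CA, tl_CO, tl_R, tl_RC, tl_RD, tl_RM, tl_RO, tl_RP, tl_RR, tl_RT, tl_RL, tl_P, tl_V, tl_VB, tl_VC, tl_VP, tl_L, tl_U, tl_O]

theorem step_tJA (c : Char) : StepOK tJA ['J', 'A'] c := by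
  by_cases h1 : c = 'C'
  · subst h1
    refine ⟨by decide, by decide, ?_⟩
    simp only [reduceIte]
    exact ⟨by decide, fun c' => by simp [flatGet, flatMap, String.ext_iff, tl_J, tl_JE, tl_JA, tl_JAC, tl_JAD, tl_JAR, tl_JAV, tl_JAS, tl_JL, tl_B, tl_BC, tl_C, tl_CE, tl_CP, tl_CPA, tl_CPO, tl_CA, tl_CO, tl_R, tl_RC, tl_RD, tl_RM, tl_RO, tl_RP, tl_RR, tl_RT, tl_RL, tl_P, tl_V, tl_VB, tl_VC, tl_VP, tl_L, tl_U, tl_O]⟩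
  by_cases h2 : c = 'D'
  · subst h2
    refine ⟨by decide, by decide, ?_⟩
    simp only [reduceIte]
    exact ⟨by decide, fun c' => by simp [flatGet, flatMap, String.ext_iff, tl_J, tl_JE, tl_JA, tl_JAC, tl_JAD, tl_JAR, tl_JAV, tl_JAS, tl_JL, tl_B, tl_BC, tl_C, tl_CE, tl_CP, tl_CPA, tl_CPO, tl_CA, tl_CO, tl_R, tl_RC, tl_RD, tl_RM, tl_RO, tl_RP, tl_RR, tl_RT, tl_RL, tl_P, tl_V, tl_VB, tl_VC, tl_VP, tl_L, tl_U, tl_O]⟩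
  by_cases h3 : c = 'R'
  · subst h3
    refine ⟨by decide, by decide, ?_⟩
    simp only [reduceIte]
    exact ⟨by decide, fun c' => by simp [flatGet, flatMap, String.ext_iff, tl_J, tl_JE, tl_JA, tl_JAC, tl_JAD, tl_JAR, tl_JAV, tl_JAS, tl_JL, tl_B, tl_BC, tl_C, tl_CE, tl_CP, tl_CPA, tl_CPO, tl_CA, tl_CO, tl_R, tl_RC, tl_RD, tl_RM, tl_RO, tl_RP, tl_RR, tl_RT, tl_RL, tl_P, tl_V, tl_VB, tl_VC, tl_VP, tl_L, tl_U, tl_O]⟩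
  by_cases h4 : c = 'V'
  · subst h4
    refine ⟨by decide, by decide, ?_⟩
    simp only [reduceIte]
    exact ⟨by decide, fun c' => by simp [flatGet, flatMap, String.ext_iff, tl_J, tl_JE, tl_JA, tl_JAC, tl_JAD, tl_JAR, tl_JAV, tl_JAS, tl_JL, tl_B, tl_BC, tl_C, tl_CE, tl_CP, tl_CPA, tl_CPO, tl_CA, tl_CO, tl_R, tl_RC, tl_RD, tl_RM, tl_RO, tl_RP, tl_RR, tl_RT, tl_RL, tl_P, tl_V, tl_VB, tl_VC, tl_VP, tl_L, tl_U, tl_O]⟩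
  by_cases h5 : c = 'S'
  · subst h5
    refine ⟨by decide, by decide, ?_⟩
    simp only [reduceIte]
    exact ⟨by decide, fun c' => by simp [flatGet, flatMap, String.ext_iff, tl_J, tl_JE, tl_JA, tl_JAC, tl_JAD, tl_JAR, tl_JAV, tl_JAS, tl_JL, tl_B, tl_BC, tl_C, tl_CE, tl_CP, tl_CPA, tl_CPO, tl_CA, tl_CO, tl_R, tl_RC, tl_RD, tl_RM, tl_RO, tl_RP, tl_RR, tl_RT, tl_RL, tl_P, tl_V, tl_VB, tl_VC, tl_VP, tl_L, tl_U, tl_O]⟩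
  simp only [StepOK, tJA, CatDict.get?, if_neg h1, if_neg h2, if_neg h3, if_neg h4, if_neg h5]
  simp_all [flatGet, flatMap, String.ext_iff, tl_J, tl_JE, tl_JA, tl_JAC, tl_JAD, tl_JAR, tl_JAV, tl_JAS, tl_JL, tl_B, tl_BC, tl_C, tl_CE, tl_CP, tl_CPA, tl_CPO, tl_CA, tl_CO, tl_R, tl_RC, tl_RD, tl_RM, tl_RO, tl_RP, tl_RR, tl_RT, tl_RL, tl_P, tl_V, tl_VB, tl_VC, tl_VP, tl_L, tl_U, tl_O]

theorem step_tB (c : Char) : StepOK tB ['B'] c := by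
  by_cases h1 : c = 'C'
  · subst h1
    refine ⟨by decide, by decide, ?_⟩
    simp only [reduceIte]
    exact ⟨by decide, fun c' => by simp [flatGet, flatMap, String.ext_iff, tl_J, tl_JE, tl_JA, tl_JAC, tl_JAD, tl_JAR, tl_JAV, tl_JAS, tl_JL, tl_B, tl_BC, tl_C, tl_CE, tl_CP, tl_CPA, tl_CPO, tl_CA, tl_CO, tl_R, tl_RC, tl_RD, tl_RM, tl_RO, tl_RP, tl_RR, tl_RT, tl_RL, tl_P, tl_V, tl_VB, tl_VC, tl_VP, tl_L, tl_U, tl_O]⟩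
  simp only [StepOK, tB, CatDict.get?, if_neg h1]
  simp_all [flatGet, flatMap, String.ext_iff, tl_J, tl_JE, tl_JA, tl_JAC, tl_JAD, tl_JAR, tl_JAV, tl_JAS, tl_JL, tl_B, tl_BC, tl_C, tl_CE, tl_CP, tl_CPA, tl_CPO, tl_CA, tl_CO, tl_R, tl_RC, tl_RD, tl_RM, tl_RO, tl_RP, tl_RR, tl_RT, tl_RL, tl_P, tl_V, tl_VB, tl_VC, tl_VP, tl_L, tl_U, tl_O]

theorem step_tC (c : Char) : StepOK tC ['C'] c := by
  by_cases h1 : c = 'E'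
  · subst h1
    refine ⟨by decide, by decide, ?_⟩
    simp only [reduceIte]
    exact ⟨by decide, fun c' => by simp [flatGet, flatMap, String.ext_iff, tl_J, tl_JE, tl_JA, tl_JAC, tl_JAD, tl_JAR, tl_JAV, tl_JAS, tl_JL, tl_B, tl_BC, tl_C, tl_CE, tl_CP, tl_CPA, tl_CPO, tl_CA, tl_CO, tl_R, tl_RC, tl_RD, tl_RM, tl_RO, tl_RP, tl_RR, tl_RT, tl_RL, tl_P, tl_V, tl_VB, tl_VC, tl_VP, tl_L, tl_U, tl_O]⟩
  by_cases h2 : c = 'P'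
  · subst h2
    refine ⟨by decide, by decide, ?_⟩
    have hni : ¬ (tCP = CatDict.nil) := by decide
    simp only [if_neg hni]
    exact ⟨by decide, by decide⟩
  by_cases h3 : c = 'A'
  · subst h3
    refine ⟨by decide, by decide, ?_⟩
    simp only [reduceIte]
    exact ⟨by decide, fun c' => by simp [flatGet, flatMap, String.ext_iff, tl_J, tl_JE, tl_JA, tl_JAC, tl_JAD, tl_JAR, tl_JAV, tl_JAS, tl_JL, tl_B, tl_BC, tl_C, tl_CE, tl_CP, tl_CPA, tl_CPO, tl_CA, tl_CO, tl_R, tl_RC, tl_RD, tl_RM, tl_RO, tl_RP, tl_RR, tl_RT, tl_RL, tl_P, tl_V, tl_VB, tl_VC, tl_VP, tl_L, tl_U, tl_O]⟩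
  by_cases h4 : c = 'O'
  · subst h4
    refine ⟨by decide, by decide, ?_⟩
    simp only [reduceIte]
    exact ⟨by decide, fun c' => by simp [flatGet, flatMap, String.ext_iff, tl_J, tl_JE, tl_JA, tl_JAC, tl_JAD, tl_JAR, tl_JAV, tl_JAS, tl_JL, tl_B, tl_BC, tl_C, tl_CE, tl_CP, tl_CPA, tl_CPO, tl_CA, tl_CO, tl_R, tl_RC, tl_RD, tl_RM, tl_RO, tl_RP, tl_RR, tl_RT, tl_RL, tl_P, tl_V, tl_VB, tl_VC, tl_VP, tl_L, tl_U, tl_O]⟩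
  simp only [StepOK, tC, tCP, CatDict.get?, if_neg h1, if_neg h2, if_neg h3, if_neg h4]
  simp_all [flatGet, flatMap, String.ext_iff, tl_J, tl_JE, tl_JA, tl_JAC, tl_JAD, tl_JAR, tl_JAV, tl_JAS, tl_JL, tl_B, tl_BC, tl_C, tl_CE, tl_CP, tl_CPA, tl_CPO, tl_CA, tl_CO, tl_R, tl_RC, tl_RD, tl_RM, tl_RO, tl_RP, tl_RR, tl_RT, tl_RL, tl_P, tl_V, tl_VB, tl_VC, tl_VP, tl_L, tl_U, tl_O]

theorem step_tCP (c : Char) : StepOK tCP ['C', 'P'] c := by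
  by_cases h1 : c = 'A'
  · subst h1
    refine ⟨by decide, by decide, ?_⟩
    simp only [reduceIte]
    exact ⟨by decide, fun c' => by simp [flatGet, flatMap, String.ext_iff, tl_J, tl_JE, tl_JA, tl_JAC, tl_JAD, tl_JAR, tl_JAV, tl_JAS, tl_JL, tl_B, tl_BC, tl_C, tl_CE, tl_CP, tl_CPA, tl_CPO, tl_CA, tl_CO, tl_R, tl_RC, tl_RD, tl_RM, tl_RO, tl_RP, tl_RR, tl_RT, tl_RL, tl_P, tl_V, tl_VB, tl_VC, tl_VP, tl_L, tl_U, tl_O]⟩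
  by_cases h2 : c = 'O'
  · subst h2
    refine ⟨by decide, by decide, ?_⟩
    simp only [reduceIte]
    exact ⟨by decide, fun c' => by simp [flatGet, flatMap, String.ext_iff, tl_J, tl_JE, tl_JA, tl_JAC, tl_JAD, tl_JAR, tl_JAV, tl_JAS, tl_JL, tl_B, tl_BC, tl_C, tl_CE, tl_CP, tl_CPA, tl_CPO, tl_CA, tl_CO, tl_R, tl_RC, tl_RD, tl_RM, tl_RO, tl_RP, tl_RR, tl_RT, tl_RL, tl_P, tl_V, tl_VB, tl_VC, tl_VP, tl_L, tl_U, tl_O]⟩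
  simp only [StepOK, tCP, CatDict.get?, if_neg h1, if_neg h2]
  simp_all [flatGet, flatMap, String.ext_iff, tl_J, tl_JE, tl_JA, tl_JAC, tl_JAD, tl_JAR, tl_JAV, tl_JAS, tl_JL, tl_B, tl_BC, tl_C, tl_CE, tl_CP, tl_CPA, tl_CPO, tl_CA, tl_CO, tl_R, tl_RC, tl_RD, tl_RM, tl_RO, tl_RP, tl_RR, tl_RT, tl_RL, tl_P, tl_V, tl_VB, tl_VC, tl_VP, tl_L, tl_U, tl_O]

theorem step_tR (c : Char) : StepOK tR ['R'] c := by
  by_cases h1 : c = 'C'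
  · subst h1
    refine ⟨by decide, by decide, ?_⟩
    simp only [reduceIte]
    exact ⟨by decide, fun c' => by simp [flatGet, flatMap, String.ext_iff, tl_J, tl_JE, tl_JA, tl_JAC, tl_JAD, tl_JAR, tl_JAV, tl_JAS, tl_JL, tl_B, tl_BC, tl_C, tl_CE, tl_CP, tl_CPA, tl_CPO, tl_CA, tl_CO, tl_R, tl_RC, tl_RD, tl_RM, tl_RO, tl_RP, tl_RR, tl_RT, tl_RL, tl_P, tl_V, tl_VB, tl_VC, tl_VP, tl_L, tl_U, tl_O]⟩
  by_cases h2 : c = 'D'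
  · subst h2
    refine ⟨by decide, by decide, ?_⟩
    simp only [reduceIte]
    exact ⟨by decide, fun c' => by simp [flatGet, flatMap, String.ext_iff, tl_J, tl_JE, tl_JA, tl_JAC, tl_JAD, tl_JAR, tl_JAV, tl_JAS, tl_JL, tl_B, tl_BC, tl_C, tl_CE, tl_CP, tl_CPA, tl_CPO, tl_CA, tl_CO, tl_R, tl_RC, tl_RD, tl_RM, tl_RO, tl_RP, tl_RR, tl_RT, tl_RL, tl_P, tl_V, tl_VB, tl_VC, tl_VP, tl_L, tl_U, tl_O]⟩
  by_cases h3 : c = 'M'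
  · subst h3
    refine ⟨by decide, by decide, ?_⟩
    simp only [reduceIte]
    exact ⟨by decide, fun c' => by simp [flatGet, flatMap, String.ext_iff, tl_J, tl_JE, tl_JA, tl_JAC, tl_JAD, tl_JAR, tl_JAV, tl_JAS, tl_JL, tl_B, tl_BC, tl_C, tl_CE, tl_CP, tl_CPA, tl_CPO, tl_CA, tl_CO, tl_R, tl_RC, tl_RD, tl_RM, tl_RO, tl_RP, tl_RR, tl_RT, tl_RL, tl_P, tl_V, tl_VB, tl_VC, tl_VP, tl_L, tl_U, tl_O]⟩
  by_cases h4 : c = 'O'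
  · subst h4
    refine ⟨by decide, by decide, ?_⟩
    simp only [reduceIte]
    exact ⟨by decide, fun c' => by simp [flatGet, flatMap, String.ext_iff, tl_J, tl_JE, tl_JA, tl_JAC, tl_JAD, tl_JAR, tl_JAV, tl_JAS, tl_JL, tl_B, tl_BC, tl_C, tl_CE, tl_CP, tl_CPA, tl_CPO, tl_CA, tl_CO, tl_R, tl_RC, tl_RD, tl_RM, tl_RO, tl_RP, tl_RR, tl_RT, tl_RL, tl_P, tl_V, tl_VB, tl_VC, tl_VP, tl_L, tl_U, tl_O]⟩
  by_cases h5 : c = 'P'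
  · subst h5
    refine ⟨by decide, by decide, ?_⟩
    simp only [reduceIte]
    exact ⟨by decide, fun c' => by simp [flatGet, flatMap, String.ext_iff, tl_J, tl_JE, tl_JA, tl_JAC, tl_JAD, tl_JAR, tl_JAV, tl_JAS, tl_JL, tl_B, tl_BC, tl_C, tl_CE, tl_CP, tl_CPA, tl_CPO, tl_CA, tl_CO, tl_R, tl_RC, tl_RD, tl_RM, tl_RO, tl_RP, tl_RR, tl_RT, tl_RL, tl_P, tl_V, tl_VB, tl_VC, tl_VP, tl_L, tl_U, tl_O]⟩
  by_cases h6 : c = 'R'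
  · subst h6
    refine ⟨by decide, by decide, ?_⟩
    simp only [reduceIte]
    exact ⟨by decide, fun c' => by simp [flatGet, flatMap, String.ext_iff, tl_J, tl_JE, tl_JA, tl_JAC, tl_JAD, tl_JAR, tl_JAV, tl_JAS, tl_JL, tl_B, tl_BC, tl_C, tl_CE, tl_CP, tl_CPA, tl_CPO, tl_CA, tl_CO, tl_R, tl_RC, tl_RD, tl_RM, tl_RO, tl_RP, tl_RR, tl_RT, tl_RL, tl_P, tl_V, tl_VB, tl_VC, tl_VP, tl_L, tl_U, tl_O]⟩
  by_cases h7 : c = 'T'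
  · subst h7
    refine ⟨by decide, by decide, ?_⟩
    simp only [reduceIte]
    exact ⟨by decide, fun c' => by simp [flatGet, flatMap, String.ext_iff, tl_J, tl_JE, tl_JA, tl_JAC, tl_JAD, tl_JAR, tl_JAV, tl_JAS, tl_JL, tl_B, tl_BC, tl_C, tl_CE, tl_CP, tl_CPA, tl_CPO, tl_CA, tl_CO, tl_R, tl_RC, tl_RD, tl_RM, tl_RO, tl_RP, tl_RR, tl_RT, tl_RL, tl_P, tl_V, tl_VB, tl_VC, tl_VP, tl_L, tl_U, tl_O]⟩
  by_cases h8 : c = 'L'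
  · subst h8
    refine ⟨by decide, by decide, ?_⟩
    simp only [reduceIte]
    exact ⟨by decide, fun c' => by simp [flatGet, flatMap, String.ext_iff, tl_J, tl_JE, tl_JA, tl_JAC, tl_JAD, tl_JAR, tl_JAV, tl_JAS, tl_JL, tl_B, tl_BC, tl_C, tl_CE, tl_CP, tl_CPA, tl_CPO, tl_CA, tl_CO, tl_R, tl_RC, tl_RD, tl_RM, tl_RO, tl_RP, tl_RR, tl_RT, tl_RL, tl_P, tl_V, tl_VB, tl_VC, tl_VP, tl_L, tl_U, tl_O]⟩
  simp only [StepOK, tR, CatDict.get?, if_neg h1, if_neg h2, if_neg h3, if_neg h4, if_neg h5, if_neg h6, if_neg h7, if_neg h8]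
  simp_all [flatGet, flatMap, String.ext_iff, tl_J, tl_JE, tl_JA, tl_JAC, tl_JAD, tl_JAR, tl_JAV, tl_JAS, tl_JL, tl_B, tl_BC, tl_C, tl_CE, tl_CP, tl_CPA, tl_CPO, tl_CA, tl_CO, tl_R, tl_RC, tl_RD, tl_RM, tl_RO, tl_RP, tl_RR, tl_RT, tl_RL, tl_P, tl_V, tl_VB, tl_VC, tl_VP, tl_L, tl_U, tl_O]

theorem step_tV (c : Char) : StepOK tV ['V'] c := by
  by_cases h1 : c = 'B'
  · subst h1
    refine ⟨by decide, by decide, ?_⟩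
    simp only [reduceIte]
    exact ⟨by decide, fun c' => by simp [flatGet, flatMap, String.ext_iff, tl_J, tl_JE, tl_JA, tl_JAC, tl_JAD, tl_JAR, tl_JAV, tl_JAS, tl_JL, tl_B, tl_BC, tl_C, tl_CE, tl_CP, tl_CPA, tl_CPO, tl_CA, tl_CO, tl_R, tl_RC, tl_RD, tl_RM, tl_RO, tl_RP, tl_RR, tl_RT, tl_RL, tl_P, tl_V, tl_VB, tl_VC, tl_VP, tl_L, tl_U, tl_O]⟩
  by_cases h2 : c = 'C'
  · subst h2
    refine ⟨by decide, by decide, ?_⟩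
    simp only [reduceIte]
    exact ⟨by decide, fun c' => by simp [flatGet, flatMap, String.ext_iff, tl_J, tl_JE, tl_JA, tl_JAC, tl_JAD, tl_JAR, tl_JAV, tl_JAS, tl_JL, tl_B, tl_BC, tl_C, tl_CE, tl_CP, tl_CPA, tl_CPO, tl_CA, tl_CO, tl_R, tl_RC, tl_RD, tl_RM, tl_RO, tl_RP, tl_RR, tl_RT, tl_RL, tl_P, tl_V, tl_VB, tl_VC, tl_VP, tl_L, tl_U, tl_O]⟩
  by_cases h3 : c = 'P'
  · subst h3
    refine ⟨by decide, by decide, ?_⟩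
    simp only [reduceIte]
    exact ⟨by decide, fun c' => by simp [flatGet, flatMap, String.ext_iff, tl_J, tl_JE, tl_JA, tl_JAC, tl_JAD, tl_JAR, tl_JAV, tl_JAS, tl_JL, tl_B, tl_BC, tl_C, tl_CE, tl_CP, tl_CPA, tl_CPO, tl_CA, tl_CO, tl_R, tl_RC, tl_RD, tl_RM, tl_RO, tl_RP, tl_RR, tl_RT, tl_RL, tl_P, tl_V, tl_VB, tl_VC, tl_VP, tl_L, tl_U, tl_O]⟩
  simp only [StepOK, tV, CatDict.get?, if_neg h1, if_neg h2, if_neg h3]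
  simp_all [flatGet, flatMap, String.ext_iff, tl_J, tl_JE, tl_JA, tl_JAC, tl_JAD, tl_JAR, tl_JAV, tl_JAS, tl_JL, tl_B, tl_BC, tl_C, tl_CE, tl_CP, tl_CPA, tl_CPO, tl_CA, tl_CO, tl_R, tl_RC, tl_RD, tl_RM, tl_RO, tl_RP, tl_RR, tl_RT, tl_RL, tl_P, tl_V, tl_VB, tl_VC, tl_VP, tl_L, tl_U, tl_O]

theorem step_root (c : Char) : StepOK catMap [] c := step_catMap c

theorem step_table (t : CatDict) (p : List Char) (h : (t, p) ∈ nodeTable) (c : Char) :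
    StepOK t p c := by
  fin_cases h
  · exact step_tJ c
  · exact step_tJA c
  · exact step_tB c
  · exact step_tC c
  · exact step_tCP c
  · exact step_tR c
  · exact step_tV c

theorem ofList_ne_of_length {p q : List Char} (h : p.length ≠ q.length) :
    String.ofList p ≠ String.ofList q := by
  intro he
  exact h (by simpa [String.ext_iff] using congrArg String.length he)

theorem ofList_append_singleton (p : List Char) (c : Char) :
    String.ofList p ++ String.ofList [c] = String.ofList (p ++ [c]) := by
  simp

-- the classification A performs after its loop (the match in decode_category)
def classifyA (st : Option String × String) (cat : String) : String :=
  match st with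
  | (none, _) => "Unrecognised category code: '" ++ cat ++ "'"
  | (some d, mapped) =>
    if d = "" then "Unrecognised category code: '" ++ cat ++ "'"
    else if cat ≠ mapped then
      d ++ " - partially matched '" ++ mapped ++ "' of code: '" ++ cat ++ "'"
    else d

-- the classification B performs after its loop (the match in decode_category_alt)
def classifyB (st : String × Option String) (cat : String) : String :=
  match st with
  | (mapped, some d) =>
    if mapped = cat then d
    else if internalCodes.contains mapped then "Unrecognised category code: '" ++ cat ++ "'"
    else d ++ " - partially matched '" ++ mapped ++ "' of code: '" ++ cat ++ "'"
  | (_, none) => "Unrecognised category code: '" ++ cat ++ "'"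

-- the two loops classify identically from any internal node t reached by the code p
theorem walk (l : List Char) : ∀ (t : CatDict) (p : List Char) (d0 : String),
    (t, p) ∈ nodeTable → d0 ≠ "" →
    flatGet flatMap (String.ofList p) = some d0 →
    internalCodes.contains (String.ofList p) = true →
    classifyA (decodeLoop l t (some d0) (String.ofList p)) (String.ofList (p ++ l)) =
      classifyB (altLoop p l (String.ofList p) (some d0)) (String.ofList (p ++ l)) := by
  induction l with
  | nil =>
    intro t p d0 ht hd hf hi
    simp [decodeLoop, altLoop, classifyA, classifyB, hd]
  | cons c rest ih =>
    intro t p d0 ht hd hf hi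
    have hs := step_table t p ht c
    cases hg : t.get? c with
    | none =>
      simp only [StepOK, hg] at hs
      have hne : String.ofList p ≠ String.ofList (p ++ c :: rest) :=
        ofList_ne_of_length (by simp)
      simp only [decodeLoop, hg, altLoop, hs, classifyA, classifyB]
      rw [if_neg hne, if_pos hi]
    | some pr =>
      obtain ⟨d, child⟩ := pr
      simp only [StepOK, hg] at hs
      obtain ⟨hd', hf', hrest⟩ := hs
      have hmap : (if d ≠ "" then String.ofList p ++ String.ofList [c] else String.ofList p) =
          String.ofList (p ++ [c]) := by rw [if_pos hd', ofList_append_singleton]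
      have hA : decodeLoop (c :: rest) t (some d0) (String.ofList p) =
          (if child = .nil then (some d, String.ofList (p ++ [c]))
           else decodeLoop rest child (some d) (String.ofList (p ++ [c]))) := by
        simp only [decodeLoop, hg, hmap]
      have hB : altLoop p (c :: rest) (String.ofList p) (some d0) =
          altLoop (p ++ [c]) rest (String.ofList (p ++ [c])) (some d) := by
        simp only [altLoop, hf']
      by_cases hc : child = CatDict.nil
      · rw [if_pos hc] at hrest
        obtain ⟨hint, hext⟩ := hrest
        rw [hA, if_pos hc, hB]
        cases rest with
        | nil => simp [altLoop, classifyA, classifyB, hd']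
        | cons c' rest' =>
          simp only [altLoop, hext c']
          have hne : String.ofList (p ++ c :: c' :: rest') ≠ String.ofList (p ++ [c]) :=
            ofList_ne_of_length (by simp)
          have hnc : ¬ (internalCodes.contains (String.ofList (p ++ [c])) = true) := by
            simp only [hint]; decide
          simp only [classifyA, classifyB]
          rw [if_neg hd', if_pos hne, if_neg hne.symm, if_neg hnc]
      · rw [if_neg hc] at hrest
        obtain ⟨htab, hint⟩ := hrest
        rw [hA, if_neg hc, hB]
        have h1 : p ++ c :: rest = (p ++ [c]) ++ rest := by simp
        rw [h1]
        exact ih child (p ++ [c]) d htab hd' hf' hint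

theorem decodeA_classify (cat : String) (r : Bool) (h : ¬ cat = "") :
    decode_category cat r = classifyA (decodeLoop cat.toList catMap none "") cat := by
  simp only [decode_category, classifyA, if_pos h]

theorem decodeB_classify (cat : String) (r : Bool) :
    decode_category_alt cat r = classifyB (altLoop [] cat.toList "" none) cat := rfl

theorem decode_category_eq (cat : String) (r : Bool) :
    decode_category cat r = decode_category_alt cat r := by
  by_cases h0 : cat = ""
  · subst h0; cases r <;> decide
  · rw [decodeA_classify cat r h0, decodeB_classify cat r]
    obtain ⟨c, rest, hcs⟩ : ∃ c rest, cat.toList = c :: rest := by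
      cases hh : cat.toList with
      | nil => exact absurd (String.toList_eq_nil_iff.mp hh) h0
      | cons c rest => exact ⟨c, rest, rfl⟩
    have hcat : cat = String.ofList (c :: rest) := by rw [← hcs, String.ofList_toList]
    rw [hcs, hcat]
    have hs := step_root c
    cases hg : catMap.get? c with
    | none =>
      simp only [StepOK, hg, List.nil_append] at hs
      simp only [decodeLoop, hg, altLoop, List.nil_append, hs, classifyA, classifyB]
    | some pr =>
      obtain ⟨d, child⟩ := pr
      simp only [StepOK, hg, List.nil_append] at hs
      obtain ⟨hd', hf', hrest⟩ := hs
      have hmap0 : (if d ≠ "" then "" ++ String.ofList [c] else "") = String.ofList [c] := by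
        rw [if_pos hd', String.empty_append]
      have hA2 : decodeLoop (c :: rest) catMap none "" =
          (if child = .nil then (some d, String.ofList [c])
           else decodeLoop rest child (some d) (String.ofList [c])) := by
        simp only [decodeLoop, hg, hmap0]
      have hB2 : altLoop [] (c :: rest) "" none =
          altLoop [c] rest (String.ofList [c]) (some d) := by
        simp only [altLoop, List.nil_append, hf']
      by_cases hc : child = CatDict.nil
      · rw [if_pos hc] at hrest
        obtain ⟨hint, hext⟩ := hrest
        rw [hA2, if_pos hc, hB2]
        cases rest with
        | nil => simp [altLoop, classifyA, classifyB, hd']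
        | cons c' rest' =>
          simp only [altLoop, hext c']
          have hne : String.ofList (c :: c' :: rest') ≠ String.ofList [c] :=
            ofList_ne_of_length (by simp)
          have hnc : ¬ (internalCodes.contains (String.ofList [c]) = true) := by
            simp only [hint]; decide
          simp only [classifyA, classifyB]
          rw [if_neg hd', if_pos hne, if_neg hne.symm, if_neg hnc]
      · rw [if_neg hc] at hrest
        obtain ⟨htab, hint⟩ := hrest
        rw [hA2, if_neg hc, hB2]
        exact walk rest child [c] d htab hd' hf' hint

-- ===== VERDICT (by name: the statement is the Claim_ definition above) =====
theorem decode_category_spec : Claim_equal_decode_category := by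
  intro cat_code raise_on_error _ _
  exact decode_category_eq cat_code raise_on_error
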